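-- pv_equiv track=rewrite | github.com/shobrook/rebound | env/lib/python3.5/site-packages/urwid/util.py | rle_product
-- ===== SOURCE A (Python) =====
-- def rle_append_modify(rle, a_r):
--     """
--     Append (a, r) (unpacked from *a_r*) to the rle list rle.
--     Merge with last run when possible.
--
--     MODIFIES rle parameter contents. Returns None.
--     """
--     a, r = a_r
--     if not rle or rle[-1][0] != a:
--         rle.append( (a,r) )
--         return
--     la,lr = rle[-1]
--     rle[-1] = (a, lr+r)
--
-- def rle_product( rle1, rle2 ):
--     """
--     Merge the runs of rle1 and rle2 like this:
--     eg.
--     rle1 = [ ("a", 10), ("b", 5) ]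
--     rle2 = [ ("Q", 5), ("P", 10) ]
--     rle_product: [ (("a","Q"), 5), (("a","P"), 5), (("b","P"), 5) ]
--
--     rle1 and rle2 are assumed to cover the same total run.
--     """
--     i1 = i2 = 1 # rle1, rle2 indexes
--     if not rle1 or not rle2: return []
--     a1, r1 = rle1[0]
--     a2, r2 = rle2[0]
--
--     l = []
--     while r1 and r2:
--         r = min(r1, r2)
--         rle_append_modify( l, ((a1,a2),r) )
--         r1 -= r
--         if r1 == 0 and i1< len(rle1):
--             a1, r1 = rle1[i1]
--             i1 += 1
--         r2 -= r
--         if r2 == 0 and i2< len(rle2):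
--             a2, r2 = rle2[i2]
--             i2 += 1
--     return l
-- ===== SOURCE B (Python) =====
-- def rle_product(rle1, rle2):
--     """Position-based merge: precompute each run's absolute end position,
--     then walk cut points t -> min(end1, end2), coalescing equal pairs."""
--     # runs in reverse order so the *current* run is at the end (O(1) pop)
--     runs1 = []
--     t = 0
--     for a, r in rle1:
--         t += r
--         runs1.append((a, t))
--     runs1.reverse()
--     runs2 = []
--     t = 0
--     for a, r in rle2:
--         t += r
--         runs2.append((a, t))
--     runs2.reverse()
--     out = []
--     t = 0
--     while runs1 and runs2:
--         (a1, e1), (a2, e2) = runs1[-1], runs2[-1]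
--         if e1 == t or e2 == t:
--             break
--         t2 = min(e1, e2)
--         pair = (a1, a2)
--         if out and out[-1][0] == pair:
--             out[-1] = (pair, out[-1][1] + (t2 - t))
--         else:
--             out.append((pair, t2 - t))
--         if e1 == t2 and len(runs1) > 1:
--             runs1.pop()
--         if e2 == t2 and len(runs2) > 1:
--             runs2.pop()
--         t = t2
--     return out
-- ===== Notes on version B (the rewrite author's own statement) =====
-- stated objective: alternative
-- what changed: B precomputes each run's absolute end position and merges cut points t -> min(end1,end2) over the two boundary lists, instead of A's two-index loop that subtracts min(r1,r2) from mutable run remainders and refills them from the lists.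
import Mathlib
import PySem

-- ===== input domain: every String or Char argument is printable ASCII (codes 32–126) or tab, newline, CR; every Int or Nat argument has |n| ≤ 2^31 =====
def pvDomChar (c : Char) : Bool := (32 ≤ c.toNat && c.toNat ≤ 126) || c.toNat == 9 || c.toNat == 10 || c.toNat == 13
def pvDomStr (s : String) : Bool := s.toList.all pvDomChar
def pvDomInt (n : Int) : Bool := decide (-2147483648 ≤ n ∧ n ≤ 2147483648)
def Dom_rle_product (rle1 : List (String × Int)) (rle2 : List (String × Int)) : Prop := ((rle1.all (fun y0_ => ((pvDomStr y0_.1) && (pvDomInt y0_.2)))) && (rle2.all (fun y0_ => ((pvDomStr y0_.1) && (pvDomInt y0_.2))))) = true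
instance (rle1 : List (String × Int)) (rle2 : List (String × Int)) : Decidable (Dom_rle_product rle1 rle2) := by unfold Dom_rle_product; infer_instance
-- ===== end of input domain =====

-- B replaces A's run-remainder subtraction loop by a merge over precomputed absolute run-end positions (same cost; a different decomposition of the same product).

-- B replaces A's run-remainder subtraction loop by a merge over precomputed absolute run-end positions (same cost; a different decomposition of the same product).

-- ===== PORT A =====
-- Port of A: two-index loop over run remainders r1,r2; subtract min, refill from the lists.
-- (fuel is only a totality guard: rle1.length + rle2.length + 2 always suffices, see rle_loop_eq.)
def rle_append_modify (rle : List ((String × String) × Int)) (a_r : (String × String) × Int) :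
    List ((String × String) × Int) :=
  match rle.getLast? with
  | none => rle ++ [a_r]
  | some (la, lr) =>
      if la ≠ a_r.1 then rle ++ [a_r]
      else rle.dropLast ++ [(a_r.1, lr + a_r.2)]

def rle_product_loopA (fuel : Nat) (rle1 rle2 : List (String × Int)) (a1 : String) (r1 : Int)
    (i1 : Nat) (a2 : String) (r2 : Int) (i2 : Nat) (l : List ((String × String) × Int)) :
    List ((String × String) × Int) :=
  match fuel with
  | 0 => l
  | fuel + 1 =>
    if r1 ≠ 0 ∧ r2 ≠ 0 then
      let r := min r1 r2
      let l' := rle_append_modify l ((a1, a2), r)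
      let r1' := r1 - r
      if h1 : r1' = 0 ∧ i1 < rle1.length then
        let p1 := rle1[i1]'h1.2
        let r2' := r2 - r
        if h2 : r2' = 0 ∧ i2 < rle2.length then
          rle_product_loopA fuel rle1 rle2 p1.1 p1.2 (i1+1) (rle2[i2]'h2.2).1 (rle2[i2]'h2.2).2 (i2+1) l'
        else
          rle_product_loopA fuel rle1 rle2 p1.1 p1.2 (i1+1) a2 r2' i2 l'
      else
        let r2' := r2 - r
        if h2 : r2' = 0 ∧ i2 < rle2.length then
          rle_product_loopA fuel rle1 rle2 a1 r1' i1 (rle2[i2]'h2.2).1 (rle2[i2]'h2.2).2 (i2+1) l'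
        else
          rle_product_loopA fuel rle1 rle2 a1 r1' i1 a2 r2' i2 l'
    else l

def rle_product (rle1 : List (String × Int)) (rle2 : List (String × Int)) :
    List ((String × String) × Int) :=
  match rle1, rle2 with
  | [], _ => []
  | _, [] => []
  | (a1, r1) :: _, (a2, r2) :: _ =>
      rle_product_loopA (rle1.length + rle2.length + 2) rle1 rle2 a1 r1 1 a2 r2 1 []

-- ===== PORT B =====
-- Port of B (Source B). Source B keeps each runs list reversed so that the current run is the
-- python list's LAST element (peeked with [-1], advanced with pop()); here that reversed
-- python list is the Lean list read from the head, so [-1] = head and pop() = tail.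
-- (fuel is again only a totality guard: runs1.length + runs2.length + 2 always suffices.)
def rle_buildRuns (t : Int) : List (String × Int) → List (String × Int)
  | [] => []
  | (a, r) :: tl => (a, t + r) :: rle_buildRuns (t + r) tl

def rle_product_loopB (fuel : Nat) (runs1 runs2 : List (String × Int)) (t : Int)
    (out : List ((String × String) × Int)) : List ((String × String) × Int) :=
  match fuel, runs1, runs2 with
  | fuel + 1, (a1, e1) :: tl1, (a2, e2) :: tl2 =>
    if e1 = t ∨ e2 = t then out
    else
      let t2 := min e1 e2
      let pair := (a1, a2)
      let out' :=
        match out.getLast? with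
        | some (p, pr) =>
            if p = pair then out.dropLast ++ [(pair, pr + (t2 - t))]
            else out ++ [(pair, t2 - t)]
        | none => out ++ [(pair, t2 - t)]
      let runs1' := if e1 = t2 ∧ tl1 ≠ [] then tl1 else (a1, e1) :: tl1
      let runs2' := if e2 = t2 ∧ tl2 ≠ [] then tl2 else (a2, e2) :: tl2
      rle_product_loopB fuel runs1' runs2' t2 out'
  | _, _, _ => out

def rle_product_alt (rle1 : List (String × Int)) (rle2 : List (String × Int)) :
    List ((String × String) × Int) :=
  let runs1 := rle_buildRuns 0 rle1
  let runs2 := rle_buildRuns 0 rle2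
  rle_product_loopB (runs1.length + runs2.length + 2) runs1 runs2 0 []

-- ===== PRECONDITION & SPEC =====
def Spec_rle_product (rle1 : List (String × Int)) (rle2 : List (String × Int)) (out : List ((String × String) × Int)) : Prop := out = rle_product_alt rle1 rle2
instance (rle1 : List (String × Int)) (rle2 : List (String × Int)) (out : List ((String × String) × Int)) : Decidable (Spec_rle_product rle1 rle2 out) := by unfold Spec_rle_product; infer_instance

-- ===== CLAIM (what is proved, stated in full; the proofs are below) =====
def Claim_equal_rle_product : Prop := ∀ (rle1 : List (String × Int)) (rle2 : List (String × Int)), Dom_rle_product rle1 rle2 → Spec_rle_product rle1 rle2 (rle_product rle1 rle2)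

-- ===== LEMMAS AND PROOFS =====
def pvRunFlag (runs : List (String × Int)) (t : Int) : Nat :=
  match runs with
  | (_, e) :: _ => if e = t then 0 else 1
  | [] => 0

theorem pvRunFlag_le_one (runs : List (String × Int)) (t : Int) : pvRunFlag runs t ≤ 1 := by
  unfold pvRunFlag; rcases runs with _ | ⟨⟨a, e⟩, tl⟩ <;> simp <;> split <;> omega

theorem pvRunFlag_cons (a : String) (e t : Int) (tl : List (String × Int)) :
    pvRunFlag ((a, e) :: tl) t = if e = t then 0 else 1 := rfl

theorem rle_buildRuns_cons' (t : Int) (p : String × Int) (tl : List (String × Int)) :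
    rle_buildRuns t (p :: tl) = (p.1, t + p.2) :: rle_buildRuns (t + p.2) tl := by
  cases p; rfl

theorem rle_buildRuns_length (t : Int) (l : List (String × Int)) :
    (rle_buildRuns t l).length = l.length := by
  induction l generalizing t with
  | nil => rfl
  | cons p tl ih => rw [rle_buildRuns_cons']; simp [ih]

theorem pv_min_shift (t r1 r2 : Int) : min (t + r1) (t + r2) = t + min r1 r2 := by
  rcases le_total r1 r2 with h | h <;> simp [min_def, h]

-- the inlined coalescing append of B's loop is A's rle_append_modify
theorem pv_out_eq (l : List ((String × String) × Int)) (pair : String × String) (r : Int) :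
    (match l.getLast? with
      | some (p, pr) =>
          if p = pair then l.dropLast ++ [(pair, pr + r)] else l ++ [(pair, r)]
      | none => l ++ [(pair, r)])
      = rle_append_modify l (pair, r) := by
  unfold rle_append_modify
  cases h : l.getLast? with
  | none => simp
  | some q =>
      cases q with
      | mk p pr => by_cases hp : p = pair <;> simp [hp]

theorem rle_loopB_stop (fb : Nat) (a1 : String) (e1 : Int) (tl1 : List (String × Int))
    (a2 : String) (e2 : Int) (tl2 : List (String × Int)) (t : Int)
    (out : List ((String × String) × Int)) (h : e1 = t ∨ e2 = t) :
    rle_product_loopB fb ((a1, e1) :: tl1) ((a2, e2) :: tl2) t out = out := by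
  cases fb with
  | zero => rfl
  | succ fb => rw [rle_product_loopB, if_pos h]

theorem rle_loop_eq (fa : Nat) : ∀ (fb : Nat) (rle1 rle2 : List (String × Int)) (a1 : String)
    (r1 : Int) (i1 : Nat) (a2 : String) (r2 : Int) (i2 : Nat)
    (l : List ((String × String) × Int)) (t : Int) (rest1 rest2 : List (String × Int)),
    i1 ≤ rle1.length → rle1.drop i1 = rest1 →
    i2 ≤ rle2.length → rle2.drop i2 = rest2 →
    (rle1.length - i1) + (rle2.length - i2)
      + (if r1 = 0 then 0 else 1) + (if r2 = 0 then 0 else 1) ≤ fa →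
    (rest1.length + 1) + (rest2.length + 1)
      + pvRunFlag ((a1, t + r1) :: rle_buildRuns (t + r1) rest1) t
      + pvRunFlag ((a2, t + r2) :: rle_buildRuns (t + r2) rest2) t ≤ fb →
    rle_product_loopA fa rle1 rle2 a1 r1 i1 a2 r2 i2 l
      = rle_product_loopB fb ((a1, t + r1) :: rle_buildRuns (t + r1) rest1)
          ((a2, t + r2) :: rle_buildRuns (t + r2) rest2) t l := by
  induction fa with
  | zero =>
      intro fb rle1 rle2 a1 r1 i1 a2 r2 i2 l t rest1 rest2 hi1 hd1 hi2 hd2 hma hmb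
      have h10 : r1 = 0 := by by_contra hq; rw [if_neg hq] at hma; omega
      rw [show rle_product_loopA 0 rle1 rle2 a1 r1 i1 a2 r2 i2 l = l from rfl]
      rw [rle_loopB_stop _ _ _ _ _ _ _ _ _ (Or.inl (by omega))]
  | succ fa ih =>
      intro fb rle1 rle2 a1 r1 i1 a2 r2 i2 l t rest1 rest2 hi1 hd1 hi2 hd2 hma hmb
      by_cases hg : r1 ≠ 0 ∧ r2 ≠ 0
      · -- the loop runs one more step on each side
        cases fb with
        | zero => exfalso; omega
        | succ fb =>
          simp only [pvRunFlag_cons] at hmb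
          rw [if_neg (by omega : ¬(t + r1 = t)), if_neg (by omega : ¬(t + r2 = t))] at hmb
          rw [if_neg hg.1, if_neg hg.2] at hma
          simp only [rle_product_loopA, if_pos hg]
          simp only [rle_product_loopB]
          rw [if_neg (by push_neg; constructor <;> omega : ¬(t + r1 = t ∨ t + r2 = t))]
          simp only [pv_min_shift]
          by_cases h1 : r1 - min r1 r2 = 0 ∧ i1 < rle1.length
          · have hrest1 : rest1 = rle1[i1]'h1.2 :: rle1.drop (i1+1) := by
              rw [← hd1]; exact List.drop_eq_getElem_cons h1.2
            have hlen1 : rest1.length = (rle1.drop (i1+1)).length + 1 := by rw [hrest1]; rfl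
            rw [dif_pos h1]
            rw [hrest1]
            simp only [rle_buildRuns_cons']
            by_cases h2 : r2 - min r1 r2 = 0 ∧ i2 < rle2.length
            · have hrest2 : rest2 = rle2[i2]'h2.2 :: rle2.drop (i2+1) := by
                rw [← hd2]; exact List.drop_eq_getElem_cons h2.2
              have hlen2 : rest2.length = (rle2.drop (i2+1)).length + 1 := by rw [hrest2]; rfl
              rw [dif_pos h2]
              rw [hrest2]
              simp only [rle_buildRuns_cons']
              rw [if_pos ⟨(by omega : t + r1 = t + min r1 r2), List.cons_ne_nil _ _⟩]
              rw [if_pos ⟨(by omega : t + r2 = t + min r1 r2), List.cons_ne_nil _ _⟩]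
              simp only [add_sub_cancel_left]
              rw [pv_out_eq]
              rw [show t + r1 = t + min r1 r2 by omega, show t + r2 = t + min r1 r2 by omega]
              refine ih fb _ _ _ _ _ _ _ _ _ _ _ _ (by omega) rfl (by omega) rfl
                (by split_ifs <;> omega)
                (by simp only [pvRunFlag_cons]; split_ifs <;> omega)
            · rw [dif_neg h2]
              rw [if_pos ⟨(by omega : t + r1 = t + min r1 r2), List.cons_ne_nil _ _⟩]
              rw [if_neg (by
                rintro ⟨hq1, hq2⟩
                rcases not_and_or.mp h2 with hr | hi
                · exact hr (by omega)
                · have hnil : rle2.drop i2 = [] := List.drop_eq_nil_of_le (by omega)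
                  rw [hd2] at hnil
                  rw [hnil] at hq2
                  exact hq2 rfl)]
              simp only [add_sub_cancel_left]
              rw [pv_out_eq]
              rw [show t + r2 = (t + min r1 r2) + (r2 - min r1 r2) by omega,
                  show t + r1 = t + min r1 r2 by omega]
              refine ih fb _ _ _ _ _ _ _ _ _ _ _ _ (by omega) rfl (by omega) hd2
                (by split_ifs <;> omega)
                (by simp only [pvRunFlag_cons]; split_ifs <;> omega)
          · rw [dif_neg h1]
            have hc1f : ¬(t + r1 = t + min r1 r2
                ∧ rle_buildRuns (t + r1) rest1 ≠ []) := by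
              rintro ⟨hq1, hq2⟩
              rcases not_and_or.mp h1 with hr | hi
              · exact hr (by omega)
              · have hnil : rle1.drop i1 = [] := List.drop_eq_nil_of_le (by omega)
                rw [hd1] at hnil
                rw [hnil] at hq2
                exact hq2 rfl
            by_cases h2 : r2 - min r1 r2 = 0 ∧ i2 < rle2.length
            · have hrest2 : rest2 = rle2[i2]'h2.2 :: rle2.drop (i2+1) := by
                rw [← hd2]; exact List.drop_eq_getElem_cons h2.2
              have hlen2 : rest2.length = (rle2.drop (i2+1)).length + 1 := by rw [hrest2]; rfl
              rw [dif_pos h2]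
              rw [hrest2]
              simp only [rle_buildRuns_cons']
              rw [if_neg (by
                rintro ⟨hq1, hq2⟩
                rcases not_and_or.mp h1 with hr | hi
                · exact hr (by omega)
                · have hnil : rle1.drop i1 = [] := List.drop_eq_nil_of_le (by omega)
                  rw [hd1] at hnil
                  rw [hnil] at hq2
                  exact hq2 rfl)]
              rw [if_pos ⟨(by omega : t + r2 = t + min r1 r2), List.cons_ne_nil _ _⟩]
              simp only [add_sub_cancel_left]
              rw [pv_out_eq]
              rw [show t + r1 = (t + min r1 r2) + (r1 - min r1 r2) by omega,
                  show t + r2 = t + min r1 r2 by omega]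
              refine ih fb _ _ _ _ _ _ _ _ _ _ _ _ (by omega) hd1 (by omega) rfl
                (by split_ifs <;> omega)
                (by simp only [pvRunFlag_cons]; split_ifs <;> omega)
            · rw [dif_neg h2]
              rw [if_neg hc1f]
              rw [if_neg (by
                rintro ⟨hq1, hq2⟩
                rcases not_and_or.mp h2 with hr | hi
                · exact hr (by omega)
                · have hnil : rle2.drop i2 = [] := List.drop_eq_nil_of_le (by omega)
                  rw [hd2] at hnil
                  rw [hnil] at hq2
                  exact hq2 rfl)]
              simp only [add_sub_cancel_left]
              rw [pv_out_eq]
              rw [show t + r1 = (t + min r1 r2) + (r1 - min r1 r2) by omega,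
                  show t + r2 = (t + min r1 r2) + (r2 - min r1 r2) by omega]
              refine ih fb _ _ _ _ _ _ _ _ _ _ _ _ hi1 hd1 hi2 hd2
                (by split_ifs <;> omega)
                (by simp only [pvRunFlag_cons]; split_ifs <;> omega)
      · -- the guard fails: both loops stop
        rw [rle_product_loopA, if_neg hg]
        have hst : t + r1 = t ∨ t + r2 = t := by
          rcases not_and_or.mp hg with h | h <;> [left; right] <;> omega
        rw [rle_loopB_stop _ _ _ _ _ _ _ _ _ hst]

theorem rle_loopB_nil (fb : Nat) (runs1 runs2 : List (String × Int)) (t : Int)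
    (out : List ((String × String) × Int)) (h : runs1 = [] ∨ runs2 = []) :
    rle_product_loopB fb runs1 runs2 t out = out := by
  cases fb with
  | zero => rfl
  | succ fb =>
      rcases runs1 with _ | ⟨⟨a, e⟩, tl⟩ <;>
        rcases runs2 with _ | ⟨⟨a', e'⟩, tl'⟩ <;>
        first | rfl | (exfalso; rcases h with h | h <;> simp at h)

-- ===== VERDICT (by name: the statement is the Claim_ definition above) =====
theorem rle_product_spec : Claim_equal_rle_product := by
  intro rle1 rle2 _
  unfold Spec_rle_product
  rcases rle1 with _ | ⟨⟨a1, r1⟩, tl1⟩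
  · rcases rle2 with _ | ⟨⟨a2, r2⟩, tl2⟩ <;>
      simp [rle_product, rle_product_alt, rle_buildRuns, rle_loopB_nil _ _ _ _ _ (Or.inl rfl)]
  · rcases rle2 with _ | ⟨⟨a2, r2⟩, tl2⟩
    · simp [rle_product, rle_product_alt, rle_buildRuns, rle_loopB_nil _ _ _ _ _ (Or.inr rfl)]
    · show rle_product_loopA _ _ _ a1 r1 1 a2 r2 1 [] = _
      unfold rle_product_alt
      rw [show rle_buildRuns 0 ((a1,r1)::tl1) = (a1, 0 + r1) :: rle_buildRuns (0 + r1) tl1 from rfl,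
          show rle_buildRuns 0 ((a2,r2)::tl2) = (a2, 0 + r2) :: rle_buildRuns (0 + r2) tl2 from rfl]
      refine rle_loop_eq _ _ _ _ a1 r1 1 a2 r2 1 [] 0 tl1 tl2 (by simp) rfl (by simp) rfl
        (by simp only [List.length_cons]; split_ifs <;> omega)
        (by
          have f1 := pvRunFlag_le_one ((a1, 0 + r1) :: rle_buildRuns (0 + r1) tl1) 0
          have f2 := pvRunFlag_le_one ((a2, 0 + r2) :: rle_buildRuns (0 + r2) tl2) 0
          simp only [List.length_cons, rle_buildRuns_length]
          omega)
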